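-- pv_equiv track=rewrite | github.com/huangsam/python-algorithms | misc/nearby_words.py | nearby_permutations
-- ===== SOURCE A (Python) =====
-- def get_nearby_chars(char):
--     consonants = set(['c', 'b', 'h', 'k', 't', 'r'])
--     vowels = set(['a', 'e', 'o', 'i', 'o', 'u'])
--     if char in consonants:
--         return consonants
--     if char in vowels:
--         return vowels
--     return set()
--
-- def nearby_permutations(word, index):
--     if index > len(word) - 1:
--         return set([''])
--
--     sub_words = nearby_permutations(word, index + 1)
--     nearby_letters = get_nearby_chars(word[index])
--     permutations = set()
--
--     for sub_word in sub_words: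
--         for letter in nearby_letters:
--             permutations.add(letter + sub_word)
--     return permutations
-- ===== SOURCE B (Python) =====
-- def get_nearby_chars(char):
--     consonants = set(['c', 'b', 'h', 'k', 't', 'r'])
--     vowels = set(['a', 'e', 'o', 'i', 'o', 'u'])
--     if char in consonants:
--         return consonants
--     if char in vowels:
--         return vowels
--     return set()
--
-- def nearby_permutations(word, index):
--     results = {''}
--     for i in range(len(word) - 1, index - 1, -1):
--         letters = get_nearby_chars(word[i])
--         results = {letter + rest for rest in results for letter in letters}
--     return results
-- ===== Notes on version B (the rewrite author's own statement) =====
-- stated objective: simpler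
-- what changed: Replaces the top-down recursion that builds each suffix set and prepends letters with an iterative right-to-left loop over the positions that folds a set comprehension into an explicit accumulator.
import Mathlib
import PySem

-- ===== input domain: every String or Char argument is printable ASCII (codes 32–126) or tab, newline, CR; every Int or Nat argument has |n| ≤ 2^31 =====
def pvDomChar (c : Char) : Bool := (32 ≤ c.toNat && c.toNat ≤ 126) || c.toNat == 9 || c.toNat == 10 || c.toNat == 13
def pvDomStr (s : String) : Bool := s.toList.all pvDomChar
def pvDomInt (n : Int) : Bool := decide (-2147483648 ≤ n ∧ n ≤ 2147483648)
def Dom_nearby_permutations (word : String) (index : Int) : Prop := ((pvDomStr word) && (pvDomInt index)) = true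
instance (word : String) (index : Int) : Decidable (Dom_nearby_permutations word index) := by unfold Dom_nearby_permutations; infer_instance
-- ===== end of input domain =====

-- B replaces A's top-down recursion with an iterative right-to-left accumulation; return values proved equal on Pre_.
-- ===== PORT A =====
def get_nearby_chars (char : Char) : PySem.Set Char :=
  let consonants : PySem.Set Char := PySem.Set.ofList ['c', 'b', 'h', 'k', 't', 'r']
  let vowels : PySem.Set Char := PySem.Set.ofList ['a', 'e', 'o', 'i', 'o', 'u']
  if PySem.Set.contains consonants char then consonants
  else if PySem.Set.contains vowels char then vowels
  else PySem.Set.empty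

def nearby_permutations (word : String) (index : Int) : List String :=
  if index > PySem.Str.len word - 1 then [""]
  else
    let sub_words := nearby_permutations word (index + 1)
    let nearby_letters := get_nearby_chars (PySem.List.pyGetD word.toList index ' ')
    sub_words.foldl (fun permutations sub_word =>
      nearby_letters.foldl (fun permutations letter =>
        PySem.Set.add permutations (String.ofList (letter :: sub_word.toList))) permutations)
      PySem.Set.empty
termination_by (PySem.Str.len word - index).toNat
decreasing_by simp [PySem.Str.len] at *; omega

-- ===== PORT B =====
-- Source B's get_nearby_chars is the same helper, ported once above.
def nearby_permutations_alt (word : String) (index : Int) : List String :=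
  (PySem.List.pyRange (PySem.Str.len word - 1) (index - 1) (-1)).foldl
    (fun results i =>
      let letters := get_nearby_chars (PySem.List.pyGetD word.toList i ' ')
      results.foldl (fun acc rest =>
        letters.foldl (fun acc letter =>
          PySem.Set.add acc (String.ofList (letter :: rest.toList))) acc)
        PySem.Set.empty)
    [""]

-- ===== PRECONDITION & SPEC =====
-- Pre_ excludes exactly index < -len(word), where Python A (and B alike) raises IndexError on word[j].
def Pre_nearby_permutations (word : String) (index : Int) : Prop :=
  -(PySem.Str.len word) <= index
instance (word : String) (index : Int) : Decidable (Pre_nearby_permutations word index) := by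
  unfold Pre_nearby_permutations; infer_instance
def pvWitness_nearby_permutations : String × Int := ("ab", 0)

def Spec_nearby_permutations (word : String) (index : Int) (out : List String) : Prop := out = nearby_permutations_alt word index
instance (word : String) (index : Int) (out : List String) : Decidable (Spec_nearby_permutations word index out) := by unfold Spec_nearby_permutations; infer_instance

-- ===== CLAIM (what is proved, stated in full; the proofs are below) =====
def Claim_equal_nearby_permutations : Prop := ∀ (word : String) (index : Int), Dom_nearby_permutations word index → Pre_nearby_permutations word index → Spec_nearby_permutations word index (nearby_permutations word index)

-- ===== LEMMAS AND PROOFS =====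
-- A countdown range extended one step at the stop end: range(a, b-1, -1) = range(a, b, -1) ++ [b] for b ≤ a.
theorem pyRange_neg_one_append_singleton (a b : Int) (h : b ≤ a) :
    PySem.List.pyRange a (b - 1) (-1) = PySem.List.pyRange a b (-1) ++ [b] := by
  rw [PySem.List.pyRange_neg_one_eq_reverse, PySem.List.pyRange_neg_one_eq_reverse,
    show b - 1 + 1 = b by ring, PySem.List.pyRange_one_cons (by omega : b < a + 1)]
  simp

-- B's fold peels its last position: alt at index = one comprehension step applied to alt at index+1.
theorem alt_step (word : String) (index : Int) (h : index ≤ PySem.Str.len word - 1) :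
    nearby_permutations_alt word index =
      (nearby_permutations_alt word (index + 1)).foldl (fun acc rest =>
        (get_nearby_chars (PySem.List.pyGetD word.toList index ' ')).foldl
          (fun acc letter => PySem.Set.add acc (String.ofList (letter :: rest.toList))) acc)
        PySem.Set.empty := by
  unfold nearby_permutations_alt
  rw [show index + 1 - 1 = index by ring,
    pyRange_neg_one_append_singleton (PySem.Str.len word - 1) index h, List.foldl_append]
  rfl

-- Main equivalence: A's recursion at index equals B's fold over positions [len-1 .. index].
theorem nearby_eq (word : String) (index : Int) :
    nearby_permutations word index = nearby_permutations_alt word index := by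
  by_cases h : index > PySem.Str.len word - 1
  · rw [nearby_permutations, if_pos h]
    unfold nearby_permutations_alt
    rw [PySem.List.pyRange_neg_one_eq_nil (by omega)]
    rfl
  · rw [nearby_permutations, if_neg h, alt_step word index (by omega),
      nearby_eq word (index + 1)]
termination_by (PySem.Str.len word - index).toNat
decreasing_by omega

-- ===== VERDICT (by name: the statement is the Claim_ definition above) =====
theorem nearby_permutations_spec : Claim_equal_nearby_permutations := by
  intro word index _ _
  exact nearby_eq word index
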